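-- pv_equiv track=rewrite | github.com/ihanwen99/SEFRQO | src/local_llm/utils/translation_nl_2_hint.py | extract_tables_from_expression
-- ===== SOURCE A (Python) =====
-- def extract_tables_from_expression(expression):
--     """Extract tables from the leading join expression in order"""
--     # Remove outermost parentheses
--     expression = expression.strip()
--     if expression.startswith('(') and expression.endswith(')'):
--         expression = expression[1:-1]
--     # Initialize a stack and list to store tables
--     stack = []
--     table_list = []
--     i = 0
--     while i < len(expression):
--         if expression[i] == '(':
--             stack.append('(')
--             i += 1
--         elif expression[i] == ')':
--             if stack and stack[-1] == '(':
--                 stack.pop()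
--             i += 1
--         elif expression[i].isspace():
--             i += 1
--         else:
--             # Read a table name
--             start = i
--             while i < len(expression) and not expression[i].isspace() and expression[i] != '(' and expression[i] != ')':
--                 i += 1
--             table = expression[start:i]
--             table_list.append(table)
--     return table_list
-- ===== SOURCE B (Python) =====
-- def extract_tables_from_expression(expression):
--     """Extract tables from the leading join expression in order"""
--     expression = expression.strip()
--     if expression.startswith('(') and expression.endswith(')'):
--         expression = expression[1:-1]
--     # turn every parenthesis into a space, then let str.split() do the scanning
--     return expression.translate(str.maketrans('()', '  ')).split()
-- ===== Notes on version B (the rewrite author's own statement) =====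
-- stated objective: simpler
-- what changed: Replaced A's manual index/stack character scanner with translate('()' to spaces) followed by str.split(), moving the per-character work into C-implemented builtins.
import Mathlib
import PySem

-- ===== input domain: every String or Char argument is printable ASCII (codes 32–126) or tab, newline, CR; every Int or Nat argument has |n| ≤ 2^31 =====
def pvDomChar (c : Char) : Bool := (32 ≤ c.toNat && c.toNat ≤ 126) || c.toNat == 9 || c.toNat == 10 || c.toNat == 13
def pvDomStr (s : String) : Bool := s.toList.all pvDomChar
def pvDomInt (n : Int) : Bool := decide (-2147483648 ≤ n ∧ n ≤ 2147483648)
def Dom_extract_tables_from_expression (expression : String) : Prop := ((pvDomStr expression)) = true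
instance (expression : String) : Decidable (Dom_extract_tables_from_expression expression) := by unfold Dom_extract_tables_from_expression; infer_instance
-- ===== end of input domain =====

-- B replaces A's manual index/stack scanner by "turn parentheses into spaces, then split()" (objective: simpler).

-- ===== PORT A =====
-- the inner while-loop condition: not whitespace and not a parenthesis
def pvNameChar (c : Char) : Bool := !PySem.Chars.isspace c && c != '(' && c != ')'

-- A's inner while loop: (table-name characters read, remaining characters)
def pvTakeName : List Char → List Char × List Char
  | [] => ([], [])
  | c :: rest =>
    if pvNameChar c then
      let p := pvTakeName rest
      (c :: p.1, p.2)
    else ([], c :: rest)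

-- needed by pvLoopA's termination proof
theorem pvTakeName_snd_len (l : List Char) : (pvTakeName l).2.length ≤ l.length := by
  induction l with
  | nil => simp [pvTakeName]
  | cons c rest ih =>
    simp only [pvTakeName]
    split
    · simpa using Nat.le_succ_of_le ih
    · simp

-- A's outer while loop over (remaining characters, stack, table_list)
def pvLoopA : List Char → List Char → List String → List String
  | [], _, tables => tables
  | c :: rest, stack, tables =>
    if c = '(' then pvLoopA rest (stack ++ ['(']) tables
    else if c = ')' then
      pvLoopA rest (if stack ≠ [] ∧ stack.getLast? = some '(' then stack.dropLast else stack) tables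
    else if PySem.Chars.isspace c then pvLoopA rest stack tables
    else
      pvLoopA (pvTakeName rest).2 stack (tables ++ [String.ofList (c :: (pvTakeName rest).1)])
  termination_by chars _ _ => chars.length
  decreasing_by
  · simp
  · simp
  · simp
  · exact Nat.lt_succ_of_le (pvTakeName_snd_len rest)

def extract_tables_from_expression (expression : String) : List String :=
  let e := PySem.Chars.strip expression.toList
  let e := if PySem.Chars.startswith e ['('] && PySem.Chars.endswith e [')'] then
             PySem.Chars.slice e (some 1) (some (-1))
           else e
  pvLoopA e [] []

-- ===== PORT B =====
-- str.maketrans('()', '  ') / translate, character by character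
def pvRepl (c : Char) : Char := if c = '(' ∨ c = ')' then ' ' else c

def extract_tables_from_expression_alt (expression : String) : List String :=
  let e := PySem.Chars.strip expression.toList
  let e := if PySem.Chars.startswith e ['('] && PySem.Chars.endswith e [')'] then
             PySem.Chars.slice e (some 1) (some (-1))
           else e
  (PySem.Chars.split₀ (e.map pvRepl)).map String.ofList

-- ===== PRECONDITION & SPEC =====
def Spec_extract_tables_from_expression (expression : String) (out : List String) : Prop := out = extract_tables_from_expression_alt expression
instance (expression : String) (out : List String) : Decidable (Spec_extract_tables_from_expression expression out) := by unfold Spec_extract_tables_from_expression; infer_instance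

-- ===== CLAIM (what is proved, stated in full; the proofs are below) =====
def Claim_equal_extract_tables_from_expression : Prop := ∀ (expression : String), Dom_extract_tables_from_expression expression → Spec_extract_tables_from_expression expression (extract_tables_from_expression expression)

-- ===== LEMMAS AND PROOFS =====

theorem pvRepl_space {c : Char} (h : pvNameChar c = false) :
    PySem.Chars.isspace (pvRepl c) = true := by
  unfold pvNameChar at h
  unfold pvRepl
  by_cases h1 : c = '(' ∨ c = ')'
  · simp [h1]; decide
  · simp only [if_neg h1]
    push Not at h1
    simp [h1.1, h1.2] at h
    exact h

theorem pvRepl_name {c : Char} (h : pvNameChar c = true) :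
    pvRepl c = c ∧ PySem.Chars.isspace c = false := by
  unfold pvNameChar at h
  simp only [Bool.and_eq_true, Bool.not_eq_true', bne_iff_ne] at h
  exact ⟨by unfold pvRepl; simp [h.1.2, h.2], h.1.1⟩

-- the accumulator of split₀.go only gets prepended to the result
theorem pvGo_shift (cs : List Char) : ∀ (cur : List Char) (acc : List (List Char)),
    PySem.Chars.split₀.go cs cur acc = acc.reverse ++ PySem.Chars.split₀.go cs cur [] := by
  induction cs with
  | nil =>
    intro cur acc
    simp only [PySem.Chars.split₀.go]
    by_cases h : cur.isEmpty
    · simp [h]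
    · simp [h]
  | cons x cs ih =>
    intro cur acc
    simp only [PySem.Chars.split₀.go]
    by_cases hx : PySem.Chars.isspace x
    · by_cases hc : cur.isEmpty
      · simp only [hx, hc, if_true]
        exact ih [] acc
      · simp only [hx, hc, if_true, if_false, Bool.false_eq_true]
        rw [ih [] (cur.reverse :: acc), ih [] [cur.reverse]]
        simp
    · simp only [hx, Bool.false_eq_true, if_false]
      exact ih (x :: cur) acc

-- split₀.go accumulates exactly the characters A's inner loop reads
theorem pvGo_word (l : List Char) : ∀ (cur : List Char) (acc : List (List Char)),
    PySem.Chars.split₀.go (l.map pvRepl) cur acc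
      = PySem.Chars.split₀.go ((pvTakeName l).2.map pvRepl) ((pvTakeName l).1.reverse ++ cur) acc := by
  induction l with
  | nil => intro cur acc; simp [pvTakeName]
  | cons c rest ih =>
    intro cur acc
    by_cases hc : pvNameChar c
    · obtain ⟨hr, hs⟩ := pvRepl_name hc
      simp only [pvTakeName, hc, if_true, List.map_cons, PySem.Chars.split₀.go, hr, hs,
        Bool.false_eq_true, if_false]
      rw [ih (c :: cur) acc]
      simp
    · simp [pvTakeName, hc]

-- what remains after A's inner loop starts with a non-name character (or is empty)
theorem pvTakeName_snd_head (l : List Char) :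
    (pvTakeName l).2 = [] ∨ ∃ d r', (pvTakeName l).2 = d :: r' ∧ pvNameChar d = false := by
  induction l with
  | nil => simp [pvTakeName]
  | cons c rest ih =>
    by_cases hc : pvNameChar c
    · simpa [pvTakeName, hc] using ih
    · exact Or.inr ⟨c, rest, by simp [pvTakeName, hc], by simpa using hc⟩

-- flushing a nonempty word at a boundary
theorem pvGo_flush (r w : List Char) (hw : w ≠ [])
    (hr : r = [] ∨ ∃ d r', r = d :: r' ∧ pvNameChar d = false) :
    PySem.Chars.split₀.go (r.map pvRepl) w.reverse []
      = w :: PySem.Chars.split₀.go (r.map pvRepl) [] [] := by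
  rcases hr with rfl | ⟨d, r', rfl, hd⟩
  · simp [PySem.Chars.split₀.go, hw]
  · have hds := pvRepl_space hd
    simp only [List.map_cons, PySem.Chars.split₀.go, hds, if_true]
    have hwr : w.reverse.isEmpty = false := by simpa using hw
    simp only [hwr, Bool.false_eq_true, if_false, List.reverse_reverse]
    rw [pvGo_shift (r'.map pvRepl) [] [w]]
    simp

-- main invariant: A's outer loop computes tables ++ (split of the translated remainder)
theorem pvLoopA_eq (chars stack : List Char) (tables : List String) :
    pvLoopA chars stack tables
      = tables ++ (PySem.Chars.split₀.go (chars.map pvRepl) [] []).map String.ofList := by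
  induction chars, stack, tables using pvLoopA.induct with
  | case1 stack tables => simp [pvLoopA, PySem.Chars.split₀.go]
  | case2 rest stack tables ih =>
    rw [pvLoopA]
    have hsp : PySem.Chars.isspace ' ' = true := by decide
    simp only []
    rw [if_pos trivial, ih]
    simp [PySem.Chars.split₀.go, pvRepl, hsp]
  | case3 rest stack tables hne ih =>
    rw [pvLoopA]
    have hsp : PySem.Chars.isspace ' ' = true := by decide
    simp only [dite_eq_ite] at ih
    simp only [if_neg hne]
    rw [if_pos trivial, ih]
    simp [PySem.Chars.split₀.go, pvRepl, hsp]
  | case4 c rest stack tables hc1 hc2 hs ih =>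
    rw [pvLoopA]
    simp only [if_neg hc1, if_neg hc2, if_pos hs]
    rw [ih]
    have hrc : pvRepl c = c := by unfold pvRepl; simp [hc1, hc2]
    simp [PySem.Chars.split₀.go, hrc, hs]
  | case5 c rest stack tables hc1 hc2 hs ih =>
    rw [pvLoopA]
    simp only [if_neg hc1, if_neg hc2, if_neg hs]
    rw [ih]
    have hname : pvNameChar c = true := by
      unfold pvNameChar
      simp only [Bool.and_eq_true, Bool.not_eq_true', bne_iff_ne]
      exact ⟨⟨by simpa using hs, hc1⟩, hc2⟩
    obtain ⟨hrc, hsc⟩ := pvRepl_name hname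
    have step1 : PySem.Chars.split₀.go ((c :: rest).map pvRepl) [] []
        = PySem.Chars.split₀.go ((pvTakeName rest).2.map pvRepl)
            ((c :: (pvTakeName rest).1).reverse) [] := by
      simp only [List.map_cons, PySem.Chars.split₀.go, hrc, hsc, Bool.false_eq_true, if_false]
      rw [pvGo_word rest [c] []]
      simp
    rw [step1, pvGo_flush _ _ (by simp) (pvTakeName_snd_head rest)]
    simp

-- ===== VERDICT (by name: the statement is the Claim_ definition above) =====
theorem extract_tables_from_expression_spec : Claim_equal_extract_tables_from_expression := by
  intro expression _
  unfold Spec_extract_tables_from_expression extract_tables_from_expression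
    extract_tables_from_expression_alt PySem.Chars.split₀
  exact (pvLoopA_eq _ [] []).trans (by simp)
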